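-- pv_equiv track=rewrite | github.com/vishalgojha/archon | archon/vision/error_recovery.py | _select_button_text
-- ===== SOURCE A (Python) =====
-- def _select_button_text(buttons: list[str], strategy: str) -> str | None:
--     if not buttons:
--         return None
--
--     preference_map: dict[str, tuple[str, ...]] = {
--         "dismiss": ("dismiss", "close", "cancel", "no", "ok"),
--         "confirm": ("yes", "confirm", "continue", "submit", "ok"),
--         "retry": ("retry", "try again", "ok"),
--     }
--     preferences = preference_map.get(strategy.lower(), ())
--     lowered = [(button, button.lower()) for button in buttons]
--     for needle in preferences:
--         match = next((original for original, lower in lowered if needle in lower), None)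
--         if match is not None:
--             return match
--     return buttons[0]
-- ===== SOURCE B (Python) =====
-- def _select_button_text(buttons: list[str], strategy: str) -> str | None:
--     if not buttons:
--         return None
--
--     preference_map: dict[str, tuple[str, ...]] = {
--         "dismiss": ("dismiss", "close", "cancel", "no", "ok"),
--         "confirm": ("yes", "confirm", "continue", "submit", "ok"),
--         "retry": ("retry", "try again", "ok"),
--     }
--     preferences = preference_map.get(strategy.lower(), ())
--
--     best = None
--     best_rank = None
--     for button in buttons:
--         lower = button.lower()
--         rank = next((j for j, needle in enumerate(preferences) if needle in lower), None)
--         if rank is not None and (best_rank is None or rank < best_rank):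
--             best = button
--             best_rank = rank
--     return best if best is not None else buttons[0]
-- ===== Notes on version B (the rewrite author's own statement) =====
-- stated objective: alternative
-- what changed: Replaced the preference-outer/button-inner nested scan (one find pass over all buttons per preference keyword) by a single pass over the buttons that computes each button's preference rank and keeps the running best under a strict-less-than update, so ties keep the earliest button.
import Mathlib
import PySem

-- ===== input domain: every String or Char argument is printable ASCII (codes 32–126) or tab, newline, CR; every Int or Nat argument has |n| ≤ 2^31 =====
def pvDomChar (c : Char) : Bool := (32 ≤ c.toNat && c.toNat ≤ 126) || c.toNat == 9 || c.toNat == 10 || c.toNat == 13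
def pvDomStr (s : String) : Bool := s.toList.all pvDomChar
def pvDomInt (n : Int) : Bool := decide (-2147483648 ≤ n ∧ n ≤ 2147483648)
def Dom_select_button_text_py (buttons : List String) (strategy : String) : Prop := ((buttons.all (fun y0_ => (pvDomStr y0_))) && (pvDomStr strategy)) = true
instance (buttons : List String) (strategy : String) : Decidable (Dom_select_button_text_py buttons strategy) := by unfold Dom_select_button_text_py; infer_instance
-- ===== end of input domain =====

-- B replaces A's preference-outer/button-inner nested scan by a single pass over the buttons
-- maintaining the running best preference rank (strict-< update keeps the earliest button); same cost, alternative decomposition.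

-- the preference table both Pythons build (identical literal in both sources)
def pvPrefMap : PySem.Dict String (List String) := PySem.Dict.ofList
  [ ("dismiss", ["dismiss", "close", "cancel", "no", "ok"])
  , ("confirm", ["yes", "confirm", "continue", "submit", "ok"])
  , ("retry",   ["retry", "try again", "ok"]) ]

-- ===== PORT A =====
-- the 'for needle in preferences' loop; base case is 'return buttons[0]' (buttons nonempty ⇒ pyGet? is some)
def pvALoop (lowered : List (String × String)) (buttons : List String) : List String → Option String
  | [] => PySem.List.pyGet? buttons 0
  | needle :: rest =>
    match lowered.find? (fun bl => PySem.Str.isIn needle bl.2) with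
    | some m => some m.1
    | none => pvALoop lowered buttons rest

def select_button_text_py (buttons : List String) (strategy : String) : Option String :=
  if buttons = [] then none
  else
    let preferences := pvPrefMap.getD (PySem.Str.lower strategy) []
    let lowered := buttons.map (fun b => (b, PySem.Str.lower b))
    pvALoop lowered buttons preferences

-- ===== PORT B =====
-- rank = next((j for j, needle in enumerate(preferences) if needle in lower), None): first matching index
def pvRankOf : List String → String → Option Nat
  | [], _ => none
  | p :: ps, s => if PySem.Str.isIn p s then some 0 else (pvRankOf ps s).map (· + 1)

-- one loop iteration: update best/best_rank on a strictly smaller rank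
def pvBStep (preferences : List String) (st : Option String × Option Nat) (button : String) :
    Option String × Option Nat :=
  let lower := PySem.Str.lower button
  match pvRankOf preferences lower, st.2 with
  | some r, none => (some button, some r)
  | some r, some br => if r < br then (some button, some r) else st
  | none, _ => st

def select_button_text_py_alt (buttons : List String) (strategy : String) : Option String :=
  if buttons = [] then none
  else
    let preferences := pvPrefMap.getD (PySem.Str.lower strategy) []
    let st := buttons.foldl (pvBStep preferences) (none, none)
    match st.1 with
    | some b => some b
    | none => PySem.List.pyGet? buttons 0

-- ===== PRECONDITION & SPEC =====
def Spec_select_button_text_py (buttons : List String) (strategy : String) (out : Option String) : Prop := out = select_button_text_py_alt buttons strategy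
instance (buttons : List String) (strategy : String) (out : Option String) : Decidable (Spec_select_button_text_py buttons strategy out) := by unfold Spec_select_button_text_py; infer_instance

-- ===== CLAIM (what is proved, stated in full; the proofs are below) =====
def Claim_equal_select_button_text_py : Prop := ∀ (buttons : List String) (strategy : String), Dom_select_button_text_py buttons strategy → Spec_select_button_text_py buttons strategy (select_button_text_py buttons strategy)

-- ===== LEMMAS AND PROOFS =====

-- minimum preference rank attained by any button of the list (proof-only helper)
def pvMinRank (prefs : List String) : List String → Option Nat
  | [] => none
  | b :: bs =>
    match pvRankOf prefs (PySem.Str.lower b), pvMinRank prefs bs with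
    | none, m => m
    | some r, none => some r
    | some r, some m => some (min r m)

theorem pv_find?_congr_mem {α : Type} (l : List α) (p q : α → Bool)
    (h : ∀ a ∈ l, p a = q a) : l.find? p = l.find? q := by
  induction l with
  | nil => rfl
  | cons a l ih =>
    simp only [List.find?_cons]
    rw [h a (by simp)]
    cases q a
    · exact ih (fun a ha => h a (by simp [ha]))
    · rfl

theorem pv_minRank_nil_prefs (bs : List String) : pvMinRank [] bs = none := by
  induction bs with
  | nil => rfl
  | cons b bs ih => simp [pvMinRank, pvRankOf, ih]

-- the fold from a some-state: result is the first button achieving the overall min rank, if that beats r0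
theorem pv_fold_some (prefs : List String) (bs : List String) (b0 : String) (r0 : Nat) :
    bs.foldl (pvBStep prefs) (some b0, some r0) =
      match pvMinRank prefs bs with
      | none => (some b0, some r0)
      | some m =>
        if m < r0 then
          (bs.find? (fun b => pvRankOf prefs (PySem.Str.lower b) == some m), some m)
        else (some b0, some r0) := by
  induction bs generalizing b0 r0 with
  | nil => rfl
  | cons b bs ih =>
    simp only [List.foldl_cons, pvMinRank]
    cases hr : pvRankOf prefs (PySem.Str.lower b) with
    | none =>
      simp only [pvBStep, hr]
      rw [ih]
      cases hm : pvMinRank prefs bs with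
      | none => rfl
      | some m =>
        simp only [List.find?_cons, hr]
        by_cases hlt : m < r0 <;> simp [hlt]
    | some r =>
      simp only [pvBStep, hr]
      by_cases hlt : r < r0
      · simp only [hlt, if_pos]
        rw [ih]
        cases hm : pvMinRank prefs bs with
        | none =>
          simp [hr, hlt]
        | some m =>
          by_cases hmr : m < r
          · have h1 : min r m = m := by omega
            have h2 : m < r0 := by omega
            have hne : (some r == some m) = false := by simp; omega
            simp [hr, hmr, h1, h2, hne]
          · have h1 : min r m = r := by omega
            simp [hr, hmr, h1, hlt]
      · simp only [hlt, ite_false]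
        rw [ih]
        cases hm : pvMinRank prefs bs with
        | none => simp [hlt]
        | some m =>
          by_cases hm0 : m < r0
          · have hmr : m < r := by omega
            have h1 : min r m = m := by omega
            have hne : (some r == some m) = false := by simp; omega
            simp [hr, h1, hm0, hne]
          · have : ¬ min r m < r0 := by omega
            simp [hm0, this]

theorem pv_fold_none (prefs : List String) (bs : List String) :
    bs.foldl (pvBStep prefs) (none, none) =
      match pvMinRank prefs bs with
      | none => (none, none)
      | some m => (bs.find? (fun b => pvRankOf prefs (PySem.Str.lower b) == some m), some m) := by
  induction bs with
  | nil => rfl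
  | cons b bs ih =>
    simp only [List.foldl_cons, pvMinRank]
    cases hr : pvRankOf prefs (PySem.Str.lower b) with
    | none =>
      simp only [pvBStep, hr]
      rw [ih]
      cases hm : pvMinRank prefs bs with
      | none => rfl
      | some m => simp [hr]
    | some r =>
      simp only [pvBStep, hr]
      rw [pv_fold_some]
      cases hm : pvMinRank prefs bs with
      | none => simp [hr]
      | some m =>
        by_cases hmr : m < r
        · have h1 : min r m = m := by omega
          have hne : (some r == some m) = false := by simp; omega
          simp [hr, hmr, h1, hne]
        · have h1 : min r m = r := by omega
          simp [hr, hmr, h1]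

theorem pv_minRank_zero (prefs : List String) (bs : List String) (b : String)
    (hmem : b ∈ bs) (h0 : pvRankOf prefs (PySem.Str.lower b) = some 0) :
    pvMinRank prefs bs = some 0 := by
  induction bs with
  | nil => cases hmem
  | cons c bs ih =>
    simp only [pvMinRank]
    rcases List.mem_cons.mp hmem with h | h
    · subst h
      rw [h0]
      cases pvMinRank prefs bs with
      | none => rfl
      | some m => simp
    · rw [ih h]
      cases pvRankOf prefs (PySem.Str.lower c) with
      | none => rfl
      | some r => simp

theorem pv_minRank_shift (p : String) (rest : List String) (bs : List String)
    (h : ∀ b ∈ bs, PySem.Str.isIn p (PySem.Str.lower b) = false) :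
    pvMinRank (p :: rest) bs = (pvMinRank rest bs).map (· + 1) := by
  induction bs with
  | nil => rfl
  | cons b bs ih =>
    have hb : PySem.Str.isIn p (PySem.Str.lower b) = false := h b (by simp)
    have hrec := ih (fun x hx => h x (by simp [hx]))
    simp only [pvMinRank, pvRankOf, hb, if_neg Bool.false_ne_true, hrec]
    cases pvRankOf rest (PySem.Str.lower b) with
    | none =>
      cases pvMinRank rest bs <;> rfl
    | some r =>
      cases pvMinRank rest bs with
      | none => rfl
      | some m =>
        simp only [Option.map_some]
        congr 1
        omega

-- A's needle loop computes: first button with the minimal rank, else buttons[0]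
theorem pv_aLoop_eq (prefs : List String) (bs : List String) :
    pvALoop (bs.map (fun b => (b, PySem.Str.lower b))) bs prefs =
      match pvMinRank prefs bs with
      | none => PySem.List.pyGet? bs 0
      | some m => bs.find? (fun b => pvRankOf prefs (PySem.Str.lower b) == some m) := by
  induction prefs with
  | nil => rw [pv_minRank_nil_prefs]; rfl
  | cons p rest ih =>
    simp only [pvALoop, List.find?_map, Function.comp_def]
    cases hf : bs.find? (fun b => PySem.Str.isIn p (PySem.Str.lower b)) with
    | some b =>
      have hmem : b ∈ bs := List.mem_of_find?_eq_some hf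
      have hb : PySem.Str.isIn p (PySem.Str.lower b) = true :=
        List.find?_some (p := fun x => PySem.Str.isIn p (PySem.Str.lower x)) hf
      have h0 : pvRankOf (p :: rest) (PySem.Str.lower b) = some 0 := by
        simp only [pvRankOf]
        rw [if_pos hb]
      rw [pv_minRank_zero (p :: rest) bs b hmem h0]
      have hcongr : bs.find? (fun x => pvRankOf (p :: rest) (PySem.Str.lower x) == some 0)
          = bs.find? (fun x => PySem.Str.isIn p (PySem.Str.lower x)) := by
        apply pv_find?_congr_mem
        intro x _
        simp only [pvRankOf]
        cases hx : PySem.Str.isIn p (PySem.Str.lower x)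
        · simp only [Bool.false_eq_true, ite_false]
          cases pvRankOf rest (PySem.Str.lower x) <;> simp
        · simp
      simp [hcongr]
      have hf2 : List.find? (fun x => PySem.Chars.isIn p.toList (PySem.Chars.lower x.toList)) bs = some b := by
        simpa using hf
      exact hf2.symm
    | none =>
      have hall : ∀ x ∈ bs, PySem.Str.isIn p (PySem.Str.lower x) = false := by
        intro x hx
        simpa using List.find?_eq_none.mp hf x hx
      simp only [Option.map_none]
      rw [ih, pv_minRank_shift p rest bs hall]
      cases hm : pvMinRank rest bs with
      | none => rfl
      | some m =>
        simp only [Option.map_some]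
        apply pv_find?_congr_mem
        intro x hx
        simp only [pvRankOf, hall x hx, Bool.false_eq_true, ite_false]
        cases pvRankOf rest (PySem.Str.lower x) <;> simp

-- when the min rank is attained, the find? succeeds
theorem pv_find_attained (prefs : List String) (bs : List String) (m : Nat)
    (h : pvMinRank prefs bs = some m) :
    ∃ b, bs.find? (fun b => pvRankOf prefs (PySem.Str.lower b) == some m) = some b := by
  induction bs generalizing m with
  | nil => simp [pvMinRank] at h
  | cons b bs ih =>
    simp only [pvMinRank] at h
    cases hr : pvRankOf prefs (PySem.Str.lower b) with
    | none =>
      rw [hr] at h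
      obtain ⟨c, hc⟩ := ih m h
      exact ⟨c, by simp [hr, hc]⟩
    | some r =>
      rw [hr] at h
      cases hm : pvMinRank prefs bs with
      | none =>
        rw [hm] at h
        simp at h
        subst h
        exact ⟨b, by simp [List.find?_cons, hr]⟩
      | some mm =>
        rw [hm] at h
        simp at h
        by_cases hrm : r = m
        · exact ⟨b, by simp [hr, hrm]⟩
        · have hmmm : mm = m := by omega
          obtain ⟨c, hc⟩ := ih m (by rw [hm, hmmm])
          have hne : (some r == some m) = false := by simp [hrm]
          exact ⟨c, by simp [hr, hne, hc]⟩

-- ===== VERDICT (by name: the statement is the Claim_ definition above) =====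
theorem select_button_text_py_spec : Claim_equal_select_button_text_py := by
  intro buttons strategy _
  unfold Spec_select_button_text_py select_button_text_py select_button_text_py_alt
  by_cases hb : buttons = []
  · simp [hb]
  · simp only [hb, ite_false]
    rw [pv_fold_none, pv_aLoop_eq]
    cases hm : pvMinRank (pvPrefMap.getD (PySem.Str.lower strategy) []) buttons with
    | none => rfl
    | some m =>
      obtain ⟨c, hc⟩ := pv_find_attained _ buttons m hm
      simp [hc]
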